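-- pv_equiv track=rewrite | github.com/tn04462/sec_scraping | main/parser/filing_nlp_dependency_matcher.py | _conditions_optional
-- ===== SOURCE A (Python) =====
-- def _conditions_optional(attr: dict):
--     booleans = []
--     for key, value in attr["RIGHT_ATTRS"].items():
--         if key == "OP":
--             if value == "?":
--                 booleans.append(True)
--         else:
--             booleans.append(False)
--     return any(booleans)
-- ===== SOURCE B (Python) =====
-- def _conditions_optional(attr: dict):
--     return attr["RIGHT_ATTRS"].get("OP") == "?"
-- ===== Notes on version B (the rewrite author's own statement) =====
-- stated objective: simpler
-- what changed: The loop that builds a boolean list and then calls any() is replaced by a single direct dict lookup attr["RIGHT_ATTRS"].get("OP") == "?" (the appended False entries can never make any() true, so only the OP key matters).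
-- outside the precondition, e.g. on _conditions_optional({}): A raises KeyError, B raises KeyError
import Mathlib
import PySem

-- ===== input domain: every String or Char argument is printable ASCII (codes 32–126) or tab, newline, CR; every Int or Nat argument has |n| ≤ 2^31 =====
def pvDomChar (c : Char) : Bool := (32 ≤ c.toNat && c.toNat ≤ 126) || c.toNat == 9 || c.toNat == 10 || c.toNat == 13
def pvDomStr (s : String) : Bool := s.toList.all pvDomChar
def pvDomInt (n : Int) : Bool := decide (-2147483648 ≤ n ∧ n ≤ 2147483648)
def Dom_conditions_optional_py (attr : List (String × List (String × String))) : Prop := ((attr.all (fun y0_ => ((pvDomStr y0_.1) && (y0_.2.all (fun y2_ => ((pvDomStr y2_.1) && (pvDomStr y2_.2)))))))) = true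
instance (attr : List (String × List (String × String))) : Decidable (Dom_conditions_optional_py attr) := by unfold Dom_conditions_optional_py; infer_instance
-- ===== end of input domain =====

-- B replaces A's boolean-list loop + any() with a single dict lookup ("OP" maps to "?"); same return value on Pre_.

-- ===== PORT A =====
-- dict lookup = first match in the association list
def conditions_optional_py (attr : List (String × List (String × String))) : Bool :=
  match attr.lookup "RIGHT_ATTRS" with
  | none => false  -- KeyError in Python; excluded by Pre_
  | some rd =>
    let booleans : List Bool :=
      rd.foldl (fun acc kv =>
        if kv.1 == "OP" then
          (if kv.2 == "?" then acc ++ [true] else acc)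
        else acc ++ [false]) []
    booleans.any id

-- ===== PORT B =====
def conditions_optional_py_alt (attr : List (String × List (String × String))) : Bool :=
  match attr.lookup "RIGHT_ATTRS" with
  | none => false  -- KeyError in Python; excluded by Pre_
  | some rd => rd.lookup "OP" == some "?"

-- ===== PRECONDITION & SPEC =====
-- Pre_ excludes inputs where A raises KeyError (no "RIGHT_ATTRS" key) and association
-- lists with duplicate keys, which cannot arise from a Python dict (dict keys are unique)
-- and on which first-match assoc-list semantics is accidental.
def Pre_conditions_optional_py (attr : List (String × List (String × String))) : Prop :=
  (attr.map Prod.fst).Nodup ∧ "RIGHT_ATTRS" ∈ attr.map Prod.fst ∧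
  ∀ p ∈ attr, (p.2.map Prod.fst).Nodup
instance (attr : List (String × List (String × String))) : Decidable (Pre_conditions_optional_py attr) := by unfold Pre_conditions_optional_py; infer_instance

def pvWitness_conditions_optional_py : (List (String × List (String × String))) :=
  [("RIGHT_ATTRS", [("OP", "?"), ("POS", "NOUN")])]

def Spec_conditions_optional_py (attr : List (String × List (String × String))) (out : Bool) : Prop := out = conditions_optional_py_alt attr
instance (attr : List (String × List (String × String))) (out : Bool) : Decidable (Spec_conditions_optional_py attr out) := by unfold Spec_conditions_optional_py; infer_instance

-- ===== CLAIM (what is proved, stated in full; the proofs are below) =====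
def Claim_equal_conditions_optional_py : Prop := ∀ (attr : List (String × List (String × String))), Dom_conditions_optional_py attr → Pre_conditions_optional_py attr → Spec_conditions_optional_py attr (conditions_optional_py attr)

-- ===== LEMMAS AND PROOFS =====

-- helper: a successful first-match lookup comes from a member of the list
theorem lookup_mem {β : Type} (a : String) (b : β) :
    ∀ (l : List (String × β)), l.lookup a = some b → (a, b) ∈ l := by
  intro l
  induction l with
  | nil => intro h; simp [List.lookup] at h
  | cons kv rest ih =>
    obtain ⟨k, v⟩ := kv
    intro h
    by_cases hk : (a == k) = true
    · have ha : a = k := by simpa using hk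
      simp [List.lookup, hk] at h
      simp [ha, h]
    · simp [List.lookup, hk] at h
      exact List.mem_cons_of_mem _ (ih h)

-- A's loop appends `true` exactly for pairs ("OP","?"); the `false` entries never make any() true.
theorem foldl_booleans_any (l : List (String × String)) (acc : List Bool) :
    (l.foldl (fun acc kv =>
        if kv.1 == "OP" then
          (if kv.2 == "?" then acc ++ [true] else acc)
        else acc ++ [false]) acc).any id
      = (acc.any id || l.any (fun kv => kv.1 == "OP" && kv.2 == "?")) := by
  induction l generalizing acc with
  | nil => simp
  | cons kv rest ih =>
    simp only [List.foldl_cons, List.any_cons]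
    rw [ih]
    by_cases h1 : kv.1 == "OP" <;> by_cases h2 : kv.2 == "?" <;>
      simp [h1, h2, List.any_append, Bool.or_comm]

-- no "OP" key in the tail ⇒ no ("OP","?") pair in the tail
theorem any_eq_false_of_not_mem (l : List (String × String)) (h : "OP" ∉ l.map Prod.fst) :
    l.any (fun kv => kv.1 == "OP" && kv.2 == "?") = false := by
  induction l with
  | nil => rfl
  | cons kv rest ih =>
    simp only [List.map_cons, List.mem_cons] at h
    push Not at h
    simp only [List.any_cons, Bool.or_eq_false_iff]
    constructor
    · have : ¬ (kv.1 == "OP") = true := by simpa using fun e => h.1 e.symm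
      simp [this]
    · exact ih h.2

-- with unique keys, "some ('OP','?') pair exists" = "the first 'OP' value is '?'"
theorem any_eq_lookup (l : List (String × String)) (hnd : (l.map Prod.fst).Nodup) :
    l.any (fun kv => kv.1 == "OP" && kv.2 == "?") = (l.lookup "OP" == some "?") := by
  induction l with
  | nil => rfl
  | cons kv rest ih =>
    obtain ⟨k, v⟩ := kv
    simp only [List.map_cons, List.nodup_cons] at hnd
    simp only [List.any_cons]
    by_cases h1 : (k == "OP") = true
    · have hk : k = "OP" := by simpa using h1
      have hnm : "OP" ∉ rest.map Prod.fst := hk ▸ hnd.1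
      have hb : ("OP" == k) = true := by simp [hk]
      simp [List.lookup, hb, h1, any_eq_false_of_not_mem rest hnm]
    · have hb : ("OP" == k) = false := by
        simp only [beq_eq_false_iff_ne]; intro e; exact h1 (by simp [e])
      simp [List.lookup, hb, h1, ih hnd.2]

-- ===== VERDICT (by name: the statement is the Claim_ definition above) =====
theorem conditions_optional_py_spec : Claim_equal_conditions_optional_py := by
  intro attr _ hpre
  unfold Spec_conditions_optional_py conditions_optional_py conditions_optional_py_alt
  obtain ⟨-, hmem, hinner⟩ := hpre
  cases hlk : attr.lookup "RIGHT_ATTRS" with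
  | none => rfl
  | some rd =>
    have hrd : ("RIGHT_ATTRS", rd) ∈ attr := lookup_mem _ _ attr hlk
    have hnd := hinner _ hrd
    simp only []
    rw [foldl_booleans_any, any_eq_lookup rd hnd]
    rfl
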